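-- pv_equiv track=rewrite | github.com/rainerosion/cloud-189-scf | index.py | b64tohex
-- ===== SOURCE A (Python) =====
-- BI_RM = list("0123456789abcdefghijklmnopqrstuvwxyz")
--
-- b64map = "ABCDEFGHIJKLMNOPQRSTUVWXYZabcdefghijklmnopqrstuvwxyz0123456789+/"
--
-- def int2char(a):
--     return BI_RM[a]
--
-- def b64tohex(a):
--     d = ""
--     e = 0
--     c = 0
--     for i in range(len(a)):
--         if list(a)[i] != "=":
--             v = b64map.index(list(a)[i])
--             if 0 == e:
--                 e = 1
--                 d += int2char(v >> 2)
--                 c = 3 & v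
--             elif 1 == e:
--                 e = 2
--                 d += int2char(c << 2 | v >> 4)
--                 c = 15 & v
--             elif 2 == e:
--                 e = 3
--                 d += int2char(c)
--                 d += int2char(v >> 2)
--                 c = 3 & v
--             else:
--                 e = 0
--                 d += int2char(c << 2 | v >> 4)
--                 d += int2char(15 & v)
--     if e == 1:
--         d += int2char(c << 2)
--     return d
-- ===== SOURCE B (Python) =====
-- b64map = "ABCDEFGHIJKLMNOPQRSTUVWXYZabcdefghijklmnopqrstuvwxyz0123456789+/"
--
-- def b64tohex(a):
--     d = ""
--     acc = 0
--     nbits = 0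
--     for ch in a:
--         if ch == "=":
--             continue
--         v = b64map.index(ch)
--         acc = (acc << 6) | v
--         nbits += 6
--         while nbits >= 8:
--             nbits -= 8
--             d += format((acc >> nbits) & 0xFF, "02x")
--     if nbits == 6:
--         d += format((acc & 0x3F) << 2, "02x")
--     return d
-- ===== Notes on version B (the rewrite author's own statement) =====
-- stated objective: faster
-- what changed: Replaces A's 4-state per-nibble state machine (states e=0..3 with carry c, and a list(a) copy built twice per iteration) by a single pass with a bit accumulator: each base64 character adds 6 bits, whole bytes are flushed as two lowercase hex digits, and a final 6-bit remainder is flushed left-shifted, reproducing A's exact output for every length mod 4.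
import Mathlib
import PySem

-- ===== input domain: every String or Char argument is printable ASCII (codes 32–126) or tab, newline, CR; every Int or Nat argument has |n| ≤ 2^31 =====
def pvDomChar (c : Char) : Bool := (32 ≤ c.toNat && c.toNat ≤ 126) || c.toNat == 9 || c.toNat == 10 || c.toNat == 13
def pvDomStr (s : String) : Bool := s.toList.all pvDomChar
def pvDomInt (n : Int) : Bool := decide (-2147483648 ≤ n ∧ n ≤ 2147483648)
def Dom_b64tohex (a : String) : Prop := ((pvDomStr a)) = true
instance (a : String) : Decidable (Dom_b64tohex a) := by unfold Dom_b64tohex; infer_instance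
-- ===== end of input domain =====

-- B replaces A's 4-state per-nibble machine (which also copies list(a) twice per iteration)
-- by a one-pass bit accumulator that flushes whole bytes as two-digit hex (objective: faster,
-- measured). Both raise ValueError on characters outside the alphabet; excluded by Pre_.

-- ===== PORT A =====
-- module constants (as lists of chars, Python strings/lists of single chars)
def pvB64map : List Char := "ABCDEFGHIJKLMNOPQRSTUVWXYZabcdefghijklmnopqrstuvwxyz0123456789+/".toList
def pvBIRM : List Char := "0123456789abcdefghijklmnopqrstuvwxyz".toList

-- int2char(a) = BI_RM[a]; every index A passes is < 16, so getD never takes its default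
def pvInt2char (a : Nat) : Char := pvBIRM.getD a ' '

-- the for-loop of A over the characters, state (d, e, c); none = ValueError from b64map.index
def pvLoopA : List Char → List Char → Nat → Nat → Option (List Char × Nat × Nat)
  | [], d, e, c => some (d, e, c)
  | ch :: rest, d, e, c =>
    if ch = '=' then pvLoopA rest d e c
    else
      match PySem.List.index? pvB64map ch with
      | none => none
      | some v =>
        if e = 0 then pvLoopA rest (d ++ [pvInt2char (v >>> 2)]) 1 (3 &&& v)
        else if e = 1 then pvLoopA rest (d ++ [pvInt2char (c <<< 2 ||| v >>> 4)]) 2 (15 &&& v)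
        else if e = 2 then pvLoopA rest (d ++ [pvInt2char c, pvInt2char (v >>> 2)]) 3 (3 &&& v)
        else pvLoopA rest (d ++ [pvInt2char (c <<< 2 ||| v >>> 4), pvInt2char (15 &&& v)]) 0 c

def b64tohex (a : String) : String :=
  match pvLoopA a.toList [] 0 0 with
  | none => ""   -- Python raises ValueError here; excluded by Pre_b64tohex
  | some (d, e, c) => String.ofList (if e = 1 then d ++ [pvInt2char (c <<< 2)] else d)

-- ===== PORT B =====
def pvHexChars : List Char := "0123456789abcdef".toList

-- format(x, '02x') for the reached values 0 ≤ x < 256: exactly two lowercase hex digits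
def pvHexByte (x : Nat) : List Char := [pvHexChars.getD (x >>> 4) ' ', pvHexChars.getD (x &&& 15) ' ']

-- the 'while nbits >= 8' flush loop of B
def pvEmit (d : List Char) (acc nbits : Nat) : List Char × Nat :=
  if 8 ≤ nbits then pvEmit (d ++ pvHexByte ((acc >>> (nbits - 8)) &&& 255)) acc (nbits - 8)
  else (d, nbits)
termination_by nbits
decreasing_by omega

-- the for-loop of B, state (d, acc, nbits); none = ValueError from b64map.index
def pvLoopB : List Char → List Char → Nat → Nat → Option (List Char × Nat × Nat)
  | [], d, acc, nbits => some (d, acc, nbits)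
  | ch :: rest, d, acc, nbits =>
    if ch = '=' then pvLoopB rest d acc nbits
    else
      match PySem.List.index? pvB64map ch with
      | none => none
      | some v =>
        let acc' := acc <<< 6 ||| v
        let p := pvEmit d acc' (nbits + 6)
        pvLoopB rest p.1 acc' p.2

def b64tohex_alt (a : String) : String :=
  match pvLoopB a.toList [] 0 0 with
  | none => ""   -- Python raises ValueError here; excluded by Pre_b64tohex
  | some (d, acc, nbits) => String.ofList (if nbits = 6 then d ++ pvHexByte ((acc &&& 63) <<< 2) else d)

-- ===== PRECONDITION & SPEC =====
-- Pre_ excludes exactly the inputs where b64map.index raises ValueError (both A and B raise there):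
-- every character must be '=' or a base64 alphabet character.
def Pre_b64tohex (a : String) : Prop := (a.toList.all (fun ch => ch == '=' || pvB64map.contains ch)) = true
instance (a : String) : Decidable (Pre_b64tohex a) := by unfold Pre_b64tohex; infer_instance
def pvWitness_b64tohex : String := "TWFu"

def Spec_b64tohex (a : String) (out : String) : Prop := out = b64tohex_alt a
instance (a : String) (out : String) : Decidable (Spec_b64tohex a out) := by unfold Spec_b64tohex; infer_instance

-- ===== CLAIM (what is proved, stated in full; the proofs are below) =====
def Claim_equal_b64tohex : Prop := ∀ (a : String), Dom_b64tohex a → Pre_b64tohex a → Spec_b64tohex a (b64tohex a)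

-- ===== LEMMAS AND PROOFS =====

-- the invariant tying A's state (d, e, c) to B's state (d', acc, nbits)
def pvInv (e c : Nat) (dA : List Char) (acc nbits : Nat) (dB : List Char) : Prop :=
  (e = 0 ∧ nbits = 0 ∧ dA = dB) ∨
  (e = 1 ∧ nbits = 6 ∧ c = acc % 4 ∧ dA = dB ++ [pvHexChars.getD (acc % 64 / 4) ' ']) ∨
  (e = 2 ∧ nbits = 4 ∧ c = acc % 16 ∧ dA = dB) ∨
  (e = 3 ∧ nbits = 2 ∧ c = acc % 4 ∧ dA = dB)

theorem pvEmit_step (d : List Char) (acc nbits : Nat) (h : 8 ≤ nbits) :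
    pvEmit d acc nbits = pvEmit (d ++ pvHexByte ((acc >>> (nbits - 8)) &&& 255)) acc (nbits - 8) := by
  conv_lhs => rw [pvEmit]
  simp [h]

theorem pvEmit_done (d : List Char) (acc nbits : Nat) (h : nbits < 8) :
    pvEmit d acc nbits = (d, nbits) := by
  conv_lhs => rw [pvEmit]
  simp [Nat.not_le.mpr h]

theorem pvInt2char_eq_hex : ∀ a < 16, pvInt2char a = pvHexChars.getD a ' ' := by decide

-- mask/shift arithmetic on Nat, used to line the two loops up
theorem pv_and63 (x : Nat) : x &&& 63 = x % 64 := Nat.and_two_pow_sub_one_eq_mod x 6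
theorem pv_and255 (x : Nat) : x &&& 255 = x % 256 := Nat.and_two_pow_sub_one_eq_mod x 8
theorem pv_and15 (x : Nat) : x &&& 15 = x % 16 := Nat.and_two_pow_sub_one_eq_mod x 4
theorem pv_and3 (x : Nat) : x &&& 3 = x % 4 := Nat.and_two_pow_sub_one_eq_mod x 2
theorem pv_and3' (x : Nat) : 3 &&& x = x % 4 := by rw [Nat.and_comm]; exact pv_and3 x
theorem pv_and15' (x : Nat) : 15 &&& x = x % 16 := by rw [Nat.and_comm]; exact pv_and15 x

theorem pv_or6 (x v : Nat) (h : v < 64) : x <<< 6 ||| v = x * 64 + v := by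
  rw [← Nat.shiftLeft_add_eq_or_of_lt (by simpa using h), Nat.shiftLeft_eq]

theorem pv_or2 (c w : Nat) (h : w < 4) : c <<< 2 ||| w = c * 4 + w := by
  rw [← Nat.shiftLeft_add_eq_or_of_lt (by simpa using h), Nat.shiftLeft_eq]

theorem pv_index_lt (ch : Char) (v : Nat) (h : PySem.List.index? pvB64map ch = some v) : v < 64 := by
  obtain ⟨hk, -⟩ := PySem.List.getElem_of_index?_eq_some h
  simpa [pvB64map] using hk

-- one step of the key agreement: from any invariant state, the loops stay in lockstep
theorem pvLoop_agree (l : List Char) :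
    ∀ dA e c dB acc nbits, (∀ ch ∈ l, ch = '=' ∨ ch ∈ pvB64map) →
    pvInv e c dA acc nbits dB →
    ∃ dA' e' c' dB' acc' nbits',
      pvLoopA l dA e c = some (dA', e', c') ∧
      pvLoopB l dB acc nbits = some (dB', acc', nbits') ∧
      pvInv e' c' dA' acc' nbits' dB' := by
  induction l with
  | nil =>
    intro dA e c dB acc nbits _ hInv
    exact ⟨dA, e, c, dB, acc, nbits, rfl, rfl, hInv⟩
  | cons ch rest ih =>
    intro dA e c dB acc nbits hpre hInv
    have hch := hpre ch (List.mem_cons_self ..)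
    have hrest : ∀ x ∈ rest, x = '=' ∨ x ∈ pvB64map := fun x hx => hpre x (List.mem_cons_of_mem _ hx)
    by_cases heq : ch = '='
    · simpa [pvLoopA, pvLoopB, heq] using ih dA e c dB acc nbits hrest hInv
    · obtain ⟨v, hv⟩ : ∃ v, PySem.List.index? pvB64map ch = some v := by
        rcases hch with h | h
        · exact absurd h heq
        · exact Option.isSome_iff_exists.mp ((PySem.List.index?_isSome_iff ..).mpr h)
      have hv64 : v < 64 := pv_index_lt ch v hv
      have hv' : List.idxOf? ch pvB64map = some v := by
        rw [← PySem.List.index?_eq_idxOf?]; exact hv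
      have hor : acc <<< 6 ||| v = acc * 64 + v := pv_or6 _ _ hv64
      rcases hInv with ⟨he, hn, hd⟩ | ⟨he, hn, hc, hd⟩ | ⟨he, hn, hc, hd⟩ | ⟨he, hn, hc, hd⟩
      · -- e = 0, nbits = 0: A emits one nibble, B buffers 6 bits
        subst he hn hd
        have hA : pvLoopA (ch :: rest) dA 0 c = pvLoopA rest (dA ++ [pvInt2char (v >>> 2)]) 1 (3 &&& v) := by
          simp [pvLoopA, heq, hv']
        have hB : pvLoopB (ch :: rest) dA acc 0 = pvLoopB rest dA (acc <<< 6 ||| v) 6 := by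
          simp [pvLoopB, heq, hv', pvEmit_done _ _ 6 (by omega)]
        rw [hA, hB]
        refine ih _ _ _ _ _ _ hrest (Or.inr (Or.inl ⟨rfl, rfl, ?_, ?_⟩))
        · rw [pv_and3', hor]; omega
        · have hm : (acc <<< 6 ||| v) % 64 = v := by rw [hor]; omega
          rw [hm, Nat.shiftRight_eq_div_pow, pvInt2char_eq_hex _ (by omega)]
      · -- e = 1, nbits = 6: A emits one nibble, B flushes one byte (pending + that nibble)
        subst he hn
        have hA : pvLoopA (ch :: rest) dA 1 c
            = pvLoopA rest (dA ++ [pvInt2char (c <<< 2 ||| v >>> 4)]) 2 (15 &&& v) := by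
          simp [pvLoopA, heq, hv']
        have hB : pvLoopB (ch :: rest) dB acc 6
            = pvLoopB rest (dB ++ pvHexByte (((acc <<< 6 ||| v) >>> 4) &&& 255)) (acc <<< 6 ||| v) 4 := by
          simp [pvLoopB, heq, hv']
          rw [pvEmit_step _ _ 12 (by omega)]
          norm_num [pvEmit_done _ _ 4 (by omega)]
        rw [hA, hB]
        refine ih _ _ _ _ _ _ hrest (Or.inr (Or.inr (Or.inl ⟨rfl, rfl, ?_, ?_⟩)))
        · rw [pv_and15', hor]; omega
        · have hbyte : ((acc <<< 6 ||| v) >>> 4) &&& 255 = 4 * (acc % 64) + v / 16 := by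
            rw [Nat.shiftRight_eq_div_pow, pv_and255, hor]; omega
          have hnib : c <<< 2 ||| v >>> 4 = 4 * (acc % 4) + v / 16 := by
            rw [Nat.shiftRight_eq_div_pow, pv_or2 _ _ (by omega), hc]; omega
          have h1 : (4 * (acc % 64) + v / 16) >>> 4 = acc % 64 / 4 := by
            rw [Nat.shiftRight_eq_div_pow]; omega
          have h2 : (4 * (acc % 64) + v / 16) &&& 15 = 4 * (acc % 4) + v / 16 := by
            rw [pv_and15]; omega
          rw [hd, hnib, pvHexByte, hbyte, h1, h2, pvInt2char_eq_hex _ (by omega)]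
          simp
      · -- e = 2, nbits = 4: A emits two nibbles, B flushes one byte
        subst he hn hd
        have hA : pvLoopA (ch :: rest) dA 2 c
            = pvLoopA rest (dA ++ [pvInt2char c, pvInt2char (v >>> 2)]) 3 (3 &&& v) := by
          simp [pvLoopA, heq, hv']
        have hB : pvLoopB (ch :: rest) dA acc 4
            = pvLoopB rest (dA ++ pvHexByte (((acc <<< 6 ||| v) >>> 2) &&& 255)) (acc <<< 6 ||| v) 2 := by
          simp [pvLoopB, heq, hv']
          rw [pvEmit_step _ _ 10 (by omega)]
          norm_num [pvEmit_done _ _ 2 (by omega)]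
        rw [hA, hB]
        refine ih _ _ _ _ _ _ hrest (Or.inr (Or.inr (Or.inr ⟨rfl, rfl, ?_, ?_⟩)))
        · rw [pv_and3', hor]; omega
        · have hbyte : ((acc <<< 6 ||| v) >>> 2) &&& 255 = 16 * (acc % 16) + v / 4 := by
            rw [Nat.shiftRight_eq_div_pow, pv_and255, hor]; omega
          have h1 : (16 * (acc % 16) + v / 4) >>> 4 = acc % 16 := by
            rw [Nat.shiftRight_eq_div_pow]; omega
          have h2 : (16 * (acc % 16) + v / 4) &&& 15 = v / 4 := by
            rw [pv_and15]; omega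
          rw [pvHexByte, hbyte, h1, h2, hc, pvInt2char_eq_hex _ (by omega),
            pvInt2char_eq_hex _ (by rw [Nat.shiftRight_eq_div_pow]; omega),
            Nat.shiftRight_eq_div_pow]
      · -- e = 3, nbits = 2: A emits two nibbles, B flushes one byte; c carries over unchanged
        subst he hn hd
        have hA : pvLoopA (ch :: rest) dA 3 c
            = pvLoopA rest (dA ++ [pvInt2char (c <<< 2 ||| v >>> 4), pvInt2char (15 &&& v)]) 0 c := by
          simp [pvLoopA, heq, hv']
        have hB : pvLoopB (ch :: rest) dA acc 2
            = pvLoopB rest (dA ++ pvHexByte (((acc <<< 6 ||| v) >>> 0) &&& 255)) (acc <<< 6 ||| v) 0 := by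
          simp [pvLoopB, heq, hv']
          rw [pvEmit_step _ _ 8 (by omega)]
          norm_num [pvEmit_done _ _ 0 (by omega)]
        rw [hA, hB]
        refine ih _ _ _ _ _ _ hrest (Or.inl ⟨rfl, rfl, ?_⟩)
        have hbyte : ((acc <<< 6 ||| v) >>> 0) &&& 255 = 64 * (acc % 4) + v := by
          rw [pv_and255, hor]; omega
        have h1 : (64 * (acc % 4) + v) >>> 4 = 4 * (acc % 4) + v / 16 := by
          rw [Nat.shiftRight_eq_div_pow]; omega
        have h2 : (64 * (acc % 4) + v) &&& 15 = v % 16 := by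
          rw [pv_and15]; omega
        have hnib : c <<< 2 ||| v >>> 4 = 4 * (acc % 4) + v / 16 := by
          rw [Nat.shiftRight_eq_div_pow, pv_or2 _ _ (by omega), hc]; omega
        rw [pvHexByte, hbyte, h1, h2, hnib, pvInt2char_eq_hex _ (by omega),
          pvInt2char_eq_hex _ (by rw [pv_and15']; omega), pv_and15']

-- ===== VERDICT (by name: the statement is the Claim_ definition above) =====
theorem b64tohex_spec : Claim_equal_b64tohex := by
  intro a _ hpre
  have hpre' : ∀ ch ∈ a.toList, ch = '=' ∨ ch ∈ pvB64map := by
    simpa [Pre_b64tohex, List.all_eq_true] using hpre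
  unfold Spec_b64tohex b64tohex b64tohex_alt
  obtain ⟨dA, e, c, dB, acc, nbits, hA, hB, hInv⟩ :=
    pvLoop_agree a.toList [] 0 0 [] 0 0 hpre' (Or.inl ⟨rfl, rfl, rfl⟩)
  rw [hA, hB]
  rcases hInv with ⟨he, hn, hd⟩ | ⟨he, hn, hc, hd⟩ | ⟨he, hn, hc, hd⟩ | ⟨he, hn, hc, hd⟩
  · subst he hn hd; simp
  · -- tail flush: A's e==1 branch vs B's nbits==6 branch
    subst he hn hd
    simp only [reduceIte]
    congr 1
    have h1 : ((acc &&& 63) <<< 2) >>> 4 = acc % 64 / 4 := by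
      rw [pv_and63, Nat.shiftLeft_eq, Nat.shiftRight_eq_div_pow]; omega
    have h2 : ((acc &&& 63) <<< 2) &&& 15 = (acc % 4) * 4 := by
      rw [pv_and63, Nat.shiftLeft_eq, pv_and15]; omega
    have h3 : c <<< 2 = (acc % 4) * 4 := by rw [Nat.shiftLeft_eq, hc]
    rw [pvHexByte, h1, h2, h3, pvInt2char_eq_hex _ (by omega)]
    simp
  · subst he hn hd; simp
  · subst he hn hd; simp
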